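-- pv_equiv track=rewrite | github.com/Buddhi19/CSESproblems | CSES IntroductoryProblems/Permutations/solution.py | beautiful
-- ===== SOURCE A (Python) =====
-- def beautiful(n):
--     arr=[]
--     if n==1:
--         return [1]
--     if n<=3:
--         return None
--     if n%2==0:
--         i=2
--         while i<=n:
--             arr.append(i)
--             i+=2
--
--         i=1
--         while i<n:
--             arr.append(i)
--             i+=2
--
--     else:
--         i=2
--         while i<n:
--             arr.append(i)
--             i+=2
--
--         i=1
--         while i<=n:
--             arr.append(i)
--             i+=2
--     return arr
-- ===== SOURCE B (Python) =====
-- def beautiful(n):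
--     if n == 1:
--         return [1]
--     if n <= 3:
--         return None
--     return sorted(range(1, n + 1), key=lambda x: x % 2)
-- ===== Notes on version B (the rewrite author's own statement) =====
-- stated objective: idiomatic
-- what changed: Replaces the four explicit while-loops that build evens then odds by stepping indices with a single stable sort of range(1, n+1) keyed by parity (evens, key 0, come before odds, key 1, each class staying ascending).
import Mathlib
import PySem

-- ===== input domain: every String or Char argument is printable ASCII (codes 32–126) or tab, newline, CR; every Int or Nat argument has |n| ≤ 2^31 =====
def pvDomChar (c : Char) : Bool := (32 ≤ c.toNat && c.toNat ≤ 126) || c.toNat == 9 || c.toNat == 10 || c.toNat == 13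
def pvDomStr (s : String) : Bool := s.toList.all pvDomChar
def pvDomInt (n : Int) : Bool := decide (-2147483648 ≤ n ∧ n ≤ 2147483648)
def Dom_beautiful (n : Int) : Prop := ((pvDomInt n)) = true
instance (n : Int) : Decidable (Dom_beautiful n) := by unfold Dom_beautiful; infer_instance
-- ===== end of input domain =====

-- B replaces A's four index-stepping while-loops by one stable sort of range(1, n+1)
-- keyed by parity (idiomatic; same return values).

-- ===== PORT A =====
-- 'while i <= limit: arr.append(i); i += 2' (a strict bound 'i < n' is passed as limit n-1)
def loopStep2 (i limit : Int) : List Int :=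
  if i ≤ limit then i :: loopStep2 (i + 2) limit else []
  termination_by (limit + 2 - i).toNat
  decreasing_by omega

def beautiful (n : Int) : Option (List Int) :=
  if n = 1 then some [1]
  else if n ≤ 3 then none
  else if PySem.Int.mod n 2 = 0 then
    some (loopStep2 2 n ++ loopStep2 1 (n - 1))
  else
    some (loopStep2 2 (n - 1) ++ loopStep2 1 n)

-- ===== PORT B =====
def beautiful_alt (n : Int) : Option (List Int) :=
  if n = 1 then some [1]
  else if n ≤ 3 then none
  else some (PySem.List.sorted (PySem.List.pyRange 1 (n + 1) 1) (fun x => PySem.Int.mod x 2))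

-- ===== PRECONDITION & SPEC =====
def Spec_beautiful (n : Int) (out : Option (List Int)) : Prop := out = beautiful_alt n
instance (n : Int) (out : Option (List Int)) : Decidable (Spec_beautiful n out) := by unfold Spec_beautiful; infer_instance

-- ===== CLAIM (what is proved, stated in full; the proofs are below) =====
def Claim_equal_beautiful : Prop := ∀ (n : Int), Dom_beautiful n → Spec_beautiful n (beautiful n)

-- ===== LEMMAS AND PROOFS =====

theorem mod2_cases (a : Int) : PySem.Int.mod a 2 = 0 ∨ PySem.Int.mod a 2 = 1 := by
  simp only [PySem.Int.mod, Int.fmod_eq_emod]; omega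

theorem mod2_add_two (a : Int) : PySem.Int.mod (a + 2) 2 = PySem.Int.mod a 2 := by
  simp only [PySem.Int.mod, Int.fmod_eq_emod]; omega

-- A's loop from i with step 2 collects exactly the numbers of i's parity in range(i, limit+1)
theorem pm2 (a : Int) : PySem.Int.mod a 2 = a % 2 := by
  simp [PySem.Int.mod, Int.fmod_eq_emod]

-- A's loop from i with step 2 collects exactly the numbers of i's parity in range(i, limit+1)
theorem loop_eq_filter (a b : Int) :
    ∀ r : Int, PySem.Int.mod a 2 = r →
      loopStep2 a b
        = (PySem.List.pyRange a (b + 1) 1).filter (fun x => decide (PySem.Int.mod x 2 = r)) := by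
  induction a using loopStep2.induct (limit := b) with
  | case1 a hab ih =>
    intro r hr
    have hr2 : a % 2 = r := by rw [pm2] at hr; exact hr
    rw [loopStep2, if_pos hab, ih r (by rw [mod2_add_two, hr]),
      PySem.List.pyRange_one_cons (show a < b + 1 by omega)]
    have hnext : (PySem.List.pyRange (a + 1) (b + 1) 1).filter
          (fun x => decide (PySem.Int.mod x 2 = r))
        = (PySem.List.pyRange (a + 2) (b + 1) 1).filter
          (fun x => decide (PySem.Int.mod x 2 = r)) := by
      by_cases hb : a + 1 < b + 1
      · rw [PySem.List.pyRange_one_cons hb]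
        have h1 : ¬ ((a + 1) % 2 = r) := by omega
        simp only [List.filter_cons, pm2, h1, decide_false, Bool.false_eq_true, if_false,
          show a + 1 + 1 = a + 2 from by ring]
      · rw [PySem.List.pyRange_one_eq_nil (by omega), PySem.List.pyRange_one_eq_nil (by omega)]
    simp only [pm2] at hnext ⊢
    rw [List.filter_cons]
    simp only [hr2, decide_true, if_true, hnext]
  | case2 a hab =>
    intro r _
    rw [loopStep2, if_neg hab, PySem.List.pyRange_one_eq_nil (by omega)]
    rfl

theorem insertBy_skip {α : Type} (before : α → α → Bool) (x : α) (E O : List α)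
    (h : ∀ y ∈ E, before x y = false) :
    PySem.List.insertBy before x (E ++ O) = E ++ PySem.List.insertBy before x O := by
  induction E with
  | nil => rfl
  | cons e E' ih =>
    have he : before x e = false := h e (List.mem_cons_self ..)
    simp only [List.cons_append, PySem.List.insertBy, he, Bool.false_eq_true, if_false]
    rw [ih (fun y hy => h y (List.mem_cons_of_mem _ hy))]

-- the stable sort by parity key is: evens in order, then odds in order
theorem sorted_parity (xs : List Int) :
    PySem.List.sorted xs (fun x => PySem.Int.mod x 2)
      = xs.filter (fun x => decide (PySem.Int.mod x 2 = 0))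
        ++ xs.filter (fun x => decide (PySem.Int.mod x 2 = 1)) := by
  induction xs using List.reverseRecOn with
  | nil => rfl
  | append_singleton xs x ih =>
    rw [PySem.List.sorted_eq_foldl_insertBy, List.foldl_append,
        ← PySem.List.sorted_eq_foldl_insertBy, ih]
    simp only [List.foldl_cons, List.foldl_nil, List.filter_append, List.filter_cons,
      List.filter_nil]
    rcases mod2_cases x with hx | hx
    · -- x is even: it skips past the evens and lands in front of the odds
      have hx2 : x % 2 = 0 := by rw [pm2] at hx; exact hx
      rw [insertBy_skip _ _ _ _ (by
        intro y hy
        have h2 : PySem.Int.mod y 2 = 0 := by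
          have := List.of_mem_filter hy; simpa using this
        rw [pm2] at h2
        simp only [pm2, hx2, h2]
        simp)]
      have hins : PySem.List.insertBy
            (fun a b => decide (PySem.Int.mod a 2 < PySem.Int.mod b 2)) x
            (xs.filter (fun x => decide (PySem.Int.mod x 2 = 1)))
          = x :: xs.filter (fun x => decide (PySem.Int.mod x 2 = 1)) := by
        cases hO : xs.filter (fun x => decide (PySem.Int.mod x 2 = 1)) with
        | nil => rfl
        | cons o O' =>
          have ho : PySem.Int.mod o 2 = 1 := by
            have hm : o ∈ xs.filter (fun x => decide (PySem.Int.mod x 2 = 1)) := by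
              rw [hO]; exact List.mem_cons_self ..
            have := List.of_mem_filter hm; simpa using this
          have ho2 : o % 2 = 1 := by rw [pm2] at ho; exact ho
          simp [PySem.List.insertBy, hx2, ho2]
      rw [hins]
      have hdvd : (2:Int) ∣ x := Int.dvd_of_emod_eq_zero hx2
      simp [hx2]
    · -- x is odd: no element has a larger key, so it goes to the very end
      have hx2 : x % 2 = 1 := by rw [pm2] at hx; exact hx
      rw [PySem.List.insertBy_of_forall_not_before _ _ _ (by
        intro y hy
        simp only [pm2, hx2, decide_eq_false_iff_not, not_lt]
        omega)]
      have hndvd : ¬ (2:Int) ∣ x := by omega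
      simp [hx2]

-- ===== VERDICT (by name: the statement is the Claim_ definition above) =====
theorem beautiful_spec : Claim_equal_beautiful := by
  intro n _
  unfold Spec_beautiful beautiful beautiful_alt
  by_cases h1 : n = 1
  · simp [h1]
  · rw [if_neg h1, if_neg h1]
    by_cases h3 : n ≤ 3
    · rw [if_pos h3, if_pos h3]
    · rw [if_neg h3, if_neg h3]
      have hn4 : 4 ≤ n := by omega
      rw [sorted_parity]
      rcases mod2_cases n with he | ho
      · -- n even
        rw [if_pos he,
          loop_eq_filter 2 n 0 (by decide),
          loop_eq_filter 1 (n - 1) 1 (by decide)]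
        have hA : (PySem.List.pyRange 1 (n + 1) 1).filter
              (fun x => decide (PySem.Int.mod x 2 = 0))
            = (PySem.List.pyRange 2 (n + 1) 1).filter
              (fun x => decide (PySem.Int.mod x 2 = 0)) := by
          rw [PySem.List.pyRange_one_cons (by omega), show (1:Int) + 1 = 2 from rfl]
          simp
        have hB : (PySem.List.pyRange 1 (n + 1) 1).filter
              (fun x => decide (PySem.Int.mod x 2 = 1))
            = (PySem.List.pyRange 1 n 1).filter
              (fun x => decide (PySem.Int.mod x 2 = 1)) := by
          rw [PySem.List.pyRange_one_succ_right (by omega : (1:Int) ≤ n)]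
          have he2 : n % 2 = 0 := by rw [pm2] at he; exact he
          simp [List.filter_append]
          omega
        rw [hA, hB]
        norm_num
      · -- n odd
        rw [if_neg (by omega : ¬ PySem.Int.mod n 2 = 0),
          loop_eq_filter 2 (n - 1) 0 (by decide),
          loop_eq_filter 1 n 1 (by decide)]
        have hA : (PySem.List.pyRange 1 (n + 1) 1).filter
              (fun x => decide (PySem.Int.mod x 2 = 0))
            = (PySem.List.pyRange 2 n 1).filter
              (fun x => decide (PySem.Int.mod x 2 = 0)) := by
          rw [PySem.List.pyRange_one_cons (by omega : (1:Int) < n + 1),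
            show (1:Int) + 1 = 2 from rfl,
            PySem.List.pyRange_one_succ_right (by omega : (2:Int) ≤ n)]
          have ho2 : n % 2 = 1 := by rw [pm2] at ho; exact ho
          simp [List.filter_append, List.filter_cons]
          omega
        rw [hA]
        norm_num
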